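-- pv_equiv track=rewrite | github.com/alexbarsan944/Licenta | test.py | check_if_safe
-- ===== SOURCE A (Python) =====
-- def check_if_safe(should_be, face_list, frame_no):
--     def all_different_than(person, lst):
--         for f in lst:
--             if f == person:
--                 return False
--         return True
--
--     queue = []
--     for face in face_list:
--         queue.append(face)
--         if len(queue) >= frame_no:
--             if all_different_than(should_be, queue):
--                 return False
--             queue.pop(0)
--     return True
-- ===== SOURCE B (Python) =====
-- def check_if_safe(should_be, face_list, frame_no):
--     run = 0
--     for face in face_list:
--         if face == should_be:
--             run = 0
--         else:
--             run += 1
--             if run >= frame_no: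
--                 return False
--     return True
-- ===== Notes on version B (the rewrite author's own statement) =====
-- stated objective: simpler
-- what changed: Replaced the sliding-window queue with its per-window all-different rescan by a single pass over the list that counts consecutive non-matching faces and returns False when the count reaches frame_no.
import Mathlib
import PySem

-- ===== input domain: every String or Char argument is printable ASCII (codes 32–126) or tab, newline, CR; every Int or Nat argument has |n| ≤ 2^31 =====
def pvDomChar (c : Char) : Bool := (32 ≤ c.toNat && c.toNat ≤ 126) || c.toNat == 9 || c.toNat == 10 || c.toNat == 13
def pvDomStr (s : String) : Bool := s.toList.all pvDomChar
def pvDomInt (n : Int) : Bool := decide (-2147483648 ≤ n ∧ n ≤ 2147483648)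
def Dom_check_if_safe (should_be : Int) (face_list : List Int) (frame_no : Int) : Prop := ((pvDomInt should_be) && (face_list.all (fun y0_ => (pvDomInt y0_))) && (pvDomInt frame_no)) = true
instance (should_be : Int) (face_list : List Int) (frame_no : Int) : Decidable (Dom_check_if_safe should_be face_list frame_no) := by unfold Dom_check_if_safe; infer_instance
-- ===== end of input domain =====

-- B replaces A's sliding-window queue (re-scanned each step) by a single pass with a
-- counter of consecutive non-matching faces; same return value, shorter and plainer.

-- ===== PORT A =====
-- Python inner helper all_different_than
def all_different_than (person : Int) : List Int → Bool
  | [] => true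
  | f :: rest => if f == person then false else all_different_than person rest

-- the for-loop over face_list carrying the queue; queue.pop(0) on the (nonempty,
-- just-appended-to) queue is exactly List.drop 1
def check_if_safe_go (should_be : Int) (frame_no : Int) : List Int → List Int → Bool
  | _, [] => true
  | queue, face :: rest =>
    let q := queue ++ [face]
    if frame_no ≤ (q.length : Int) then
      if all_different_than should_be q then false
      else check_if_safe_go should_be frame_no (q.drop 1) rest
    else check_if_safe_go should_be frame_no q rest

def check_if_safe (should_be : Int) (face_list : List Int) (frame_no : Int) : Bool :=
  check_if_safe_go should_be frame_no [] face_list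

-- ===== PORT B =====
def check_if_safe_alt_go (should_be : Int) (frame_no : Int) : Int → List Int → Bool
  | _, [] => true
  | run, face :: rest =>
    if face == should_be then check_if_safe_alt_go should_be frame_no 0 rest
    else if frame_no ≤ run + 1 then false
    else check_if_safe_alt_go should_be frame_no (run + 1) rest

def check_if_safe_alt (should_be : Int) (face_list : List Int) (frame_no : Int) : Bool :=
  check_if_safe_alt_go should_be frame_no 0 face_list

-- ===== PRECONDITION & SPEC =====
def Spec_check_if_safe (should_be : Int) (face_list : List Int) (frame_no : Int) (out : Bool) : Prop := out = check_if_safe_alt should_be face_list frame_no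
instance (should_be : Int) (face_list : List Int) (frame_no : Int) (out : Bool) : Decidable (Spec_check_if_safe should_be face_list frame_no out) := by unfold Spec_check_if_safe; infer_instance

-- ===== CLAIM (what is proved, stated in full; the proofs are below) =====
def Claim_equal_check_if_safe : Prop := ∀ (should_be : Int) (face_list : List Int) (frame_no : Int), Dom_check_if_safe should_be face_list frame_no → Spec_check_if_safe should_be face_list frame_no (check_if_safe should_be face_list frame_no)

-- ===== LEMMAS AND PROOFS =====

-- leading-nonmatch count: length of the longest prefix avoiding p
def lnm (p : Int) : List Int → Nat
  | [] => 0
  | x :: xs => if x = p then 0 else lnm p xs + 1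

-- trailing-nonmatch count of a list
def tnm (p : Int) (l : List Int) : Nat := lnm p l.reverse

theorem lnm_le_length (p : Int) (l : List Int) : lnm p l ≤ l.length := by
  induction l with
  | nil => simp [lnm]
  | cons x xs ih => simp only [lnm, List.length_cons]; split <;> omega

theorem lnm_eq_length_iff (p : Int) (l : List Int) :
    lnm p l = l.length ↔ ∀ x ∈ l, x ≠ p := by
  induction l with
  | nil => simp [lnm]
  | cons x xs ih =>
    have hle := lnm_le_length p xs
    simp only [lnm, List.length_cons, List.mem_cons]
    by_cases hx : x = p
    · simp only [if_pos hx]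
      constructor
      · intro h; omega
      · intro h; exact absurd hx (h x (Or.inl rfl))
    · simp only [if_neg hx]
      constructor
      · intro h y hy
        rcases hy with rfl | hy
        · exact hx
        · exact (ih.1 (by omega)) y hy
      · intro h; have := ih.2 (fun y hy => h y (Or.inr hy)); omega

theorem all_different_than_iff (p : Int) (l : List Int) :
    all_different_than p l = true ↔ ∀ x ∈ l, x ≠ p := by
  induction l with
  | nil => simp [all_different_than]
  | cons x xs ih =>
    by_cases hx : x = p
    · simp [all_different_than, hx]
    · simp [all_different_than, hx, ih]

theorem tnm_append_singleton (p x : Int) (l : List Int) :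
    tnm p (l ++ [x]) = if x = p then 0 else tnm p l + 1 := by
  simp [tnm, List.reverse_append, lnm]

theorem lnm_dropLast (p : Int) (l : List Int) :
    lnm p l.dropLast = min (lnm p l) (l.length - 1) := by
  induction l with
  | nil => simp [lnm]
  | cons x xs ih =>
    cases xs with
    | nil => simp [lnm]
    | cons y ys =>
      by_cases hx : x = p
      · simp [List.dropLast_cons₂, lnm, hx]
      · rw [List.dropLast_cons₂]
        have h1 : lnm p (x :: (y :: ys).dropLast) = lnm p ((y :: ys).dropLast) + 1 := by
          simp [lnm, hx]
        have h2 : lnm p (x :: y :: ys) = lnm p (y :: ys) + 1 := by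
          simp [lnm, hx]
        rw [h1, h2, ih]
        simp only [List.length_cons]
        omega

theorem tnm_drop_one (p : Int) (l : List Int) :
    tnm p (l.drop 1) = min (tnm p l) (l.length - 1) := by
  have h : (l.drop 1).reverse = l.reverse.dropLast := by
    cases l with
    | nil => simp
    | cons x xs =>
      simp only [List.drop_one, List.tail_cons, List.reverse_cons]
      rw [List.dropLast_concat]
  rw [tnm, tnm, h, lnm_dropLast, List.length_reverse]

theorem tnm_le_length (p : Int) (l : List Int) : tnm p l ≤ l.length := by
  have := lnm_le_length p l.reverse
  simpa [tnm] using this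

-- the loop invariant relating A's queue to B's counter
def LoopInv (should_be frame_no : Int) (q : List Int) (run : Int) : Prop :=
  0 ≤ run ∧
  ((1 ≤ frame_no ∧ (q.length : Int) ≤ frame_no - 1 ∧
      ((q.length : Int) < frame_no - 1 → run ≤ (q.length : Int))) ∨
    (frame_no ≤ 0 ∧ q = [])) ∧
  min run (q.length : Int) = (tnm should_be q : Int)

theorem go_eq (should_be frame_no : Int) (rest : List Int) :
    ∀ (q : List Int) (run : Int), LoopInv should_be frame_no q run →
      check_if_safe_go should_be frame_no q rest
        = check_if_safe_alt_go should_be frame_no run rest := by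
  induction rest with
  | nil => intro q run _; simp [check_if_safe_go, check_if_safe_alt_go]
  | cons face rest ih =>
    intro q run hInv
    obtain ⟨hr0, hb, hmin⟩ := hInv
    have hqlen := tnm_le_length should_be q
    simp only [check_if_safe_go, check_if_safe_alt_go]
    by_cases hface : face = should_be
    · -- matching face: A's window contains a match, B resets the counter
      have hbe : (face == should_be) = true := by simp [hface]
      have hadt : all_different_than should_be (q ++ [face]) = false := by
        rw [Bool.eq_false_iff]
        intro h
        exact (all_different_than_iff should_be (q ++ [face])).1 h face (by simp) hface
      have htnm : tnm should_be (q ++ [face]) = 0 := by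
        rw [tnm_append_singleton]; simp [hface]
      simp only [hbe, if_true, hadt, Bool.false_eq_true, if_false]
      split
      · -- len ≥ frame_no: pop, recurse with drop 1
        apply ih
        refine ⟨le_refl 0, ?_, ?_⟩
        · rcases hb with ⟨h1, h2, _⟩ | ⟨h1, h2⟩
          · left
            refine ⟨h1, ?_, ?_⟩ <;> simp <;> omega
          · right; subst h2; simp; omega
        · have := tnm_drop_one should_be (q ++ [face])
          rw [htnm] at this
          simp only [this]
          omega
      · -- len < frame_no: keep queue
        apply ih
        have hl : ¬ frame_no ≤ ((q ++ [face]).length : Int) := by assumption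
        refine ⟨le_refl 0, ?_, ?_⟩
        · rcases hb with ⟨h1, _, _⟩ | ⟨h1, h2⟩
          · left
            refine ⟨h1, ?_, ?_⟩ <;> simp at hl ⊢ <;> omega
          · exfalso; subst h2; simp at hl; omega
        · rw [htnm]; simp; omega
    · -- non-matching face
      have hbe : (face == should_be) = false := by simp [hface]
      have htnm : tnm should_be (q ++ [face]) = tnm should_be q + 1 := by
        rw [tnm_append_singleton]; simp [hface]
      have hadt_iff : all_different_than should_be (q ++ [face]) = true ↔
          (q.length : Int) ≤ run := by
        rw [all_different_than_iff]
        constructor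
        · intro h
          have hq : ∀ x ∈ q, x ≠ should_be := fun x hx => h x (by simp [hx])
          have : lnm should_be q.reverse = q.reverse.length :=
            (lnm_eq_length_iff should_be q.reverse).2 (by simpa using hq)
          have : tnm should_be q = q.length := by simpa [tnm] using this
          omega
        · intro h x hx
          have : tnm should_be q = q.length := by omega
          have hall : ∀ x ∈ q.reverse, x ≠ should_be :=
            (lnm_eq_length_iff should_be q.reverse).1 (by simpa [tnm] using this)
          rcases List.mem_append.1 hx with hx | hx
          · exact hall x (by simpa using hx)
          · simp at hx; subst hx; exact hface
      simp only [hbe, Bool.false_eq_true, if_false]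
      by_cases hA : frame_no ≤ ((q ++ [face]).length : Int)
      · simp only [if_pos hA]
        simp only [List.length_append, List.length_cons, List.length_nil] at hA
        push_cast at hA
        by_cases hAll : all_different_than should_be (q ++ [face]) = true
        · -- A returns false; show B does too
          have hrun : (q.length : Int) ≤ run := hadt_iff.1 hAll
          have hB : frame_no ≤ run + 1 := by
            rcases hb with ⟨h1, h2, _⟩ | ⟨h1, _⟩ <;> omega
          simp [hAll, hB]
        · have hrun : ¬ (q.length : Int) ≤ run := fun h => hAll (hadt_iff.2 h)
          have hB : ¬ frame_no ≤ run + 1 := by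
            rcases hb with ⟨h1, h2, _⟩ | ⟨h1, h2⟩
            · omega
            · exfalso; subst h2; simp at hrun; omega
          rw [Bool.eq_false_iff.2 hAll]
          simp only [Bool.false_eq_true, if_false, if_neg hB]
          apply ih
          refine ⟨by omega, ?_, ?_⟩
          · rcases hb with ⟨h1, h2, _⟩ | ⟨h1, h2⟩
            · left
              refine ⟨h1, ?_, ?_⟩ <;> simp <;> omega
            · exfalso; subst h2; simp at hrun; omega
          · have hd := tnm_drop_one should_be (q ++ [face])
            rw [htnm] at hd
            rw [hd, Nat.cast_min]
            simp only [List.length_drop, List.length_append, List.length_cons,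
              List.length_nil]
            omega
      · -- len < frame_no: A keeps the (grown) queue; show B recurses too
        simp only [if_neg hA]
        simp only [List.length_append, List.length_cons, List.length_nil] at hA
        push_cast at hA
        have hB : ¬ frame_no ≤ run + 1 := by
          rcases hb with ⟨h1, h2, h3⟩ | ⟨h1, h2⟩
          · have := h3 (by omega); omega
          · omega
        simp only [if_neg hB]
        apply ih
        refine ⟨by omega, ?_, ?_⟩
        · rcases hb with ⟨h1, h2, h3⟩ | ⟨h1, h2⟩
          · left
            have := h3 (by omega)
            refine ⟨h1, ?_, ?_⟩ <;> simp <;> omega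
          · exfalso; omega
        · rw [htnm]
          simp
          omega

-- ===== VERDICT (by name: the statement is the Claim_ definition above) =====
theorem check_if_safe_spec : Claim_equal_check_if_safe := by
  intro should_be face_list frame_no _
  unfold Spec_check_if_safe check_if_safe check_if_safe_alt
  apply go_eq
  refine ⟨le_refl 0, ?_, by simp [tnm, lnm]⟩
  by_cases h : 1 ≤ frame_no
  · left; simp; omega
  · right; simp; omega
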